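-- pv_equiv track=rewrite | github.com/odeumgg/warhound | warhound/browsing.py | build_list_n
-- ===== SOURCE A (Python) =====
-- from collections import defaultdict, namedtuple
--
-- def build_list_n(list_event):
--     """
--     Return a parallel list of 'n' values along side the list of events.
--
--     The 'n' value of an event is its position in the sequence of same-kind
--     events within the original list. It is not an intrinsic property of the
--     event, but a contextual one.
--
--     Modifying the list will render this function's output incorrect.
--     """
--
--     list_n = []
--     counters = defaultdict(lambda: 0)
--
--     for _event in list_event:
--         _kind, _ = _event
--         list_n.append(counters[_kind])
--         counters[_kind] += 1
--
--     return list_n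
-- ===== SOURCE B (Python) =====
-- from collections import defaultdict
--
-- def build_list_n(list_event):
--     positions = defaultdict(list)
--     for i, _event in enumerate(list_event):
--         _kind, _ = _event
--         positions[_kind].append(i)
--     list_n = [0] * len(list_event)
--     for list_i in positions.values():
--         for n, i in enumerate(list_i):
--             list_n[i] = n
--     return list_n
-- ===== Notes on version B (the rewrite author's own statement) =====
-- stated objective: alternative
-- what changed: Replaces A's single pass with an inline per-kind counter dict by a two-pass group-then-scatter: a first pass groups original indices per kind into a defaultdict(list), then a second pass enumerates each kind's index list and scatters the ranks back into a preallocated output list.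
import Mathlib
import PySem

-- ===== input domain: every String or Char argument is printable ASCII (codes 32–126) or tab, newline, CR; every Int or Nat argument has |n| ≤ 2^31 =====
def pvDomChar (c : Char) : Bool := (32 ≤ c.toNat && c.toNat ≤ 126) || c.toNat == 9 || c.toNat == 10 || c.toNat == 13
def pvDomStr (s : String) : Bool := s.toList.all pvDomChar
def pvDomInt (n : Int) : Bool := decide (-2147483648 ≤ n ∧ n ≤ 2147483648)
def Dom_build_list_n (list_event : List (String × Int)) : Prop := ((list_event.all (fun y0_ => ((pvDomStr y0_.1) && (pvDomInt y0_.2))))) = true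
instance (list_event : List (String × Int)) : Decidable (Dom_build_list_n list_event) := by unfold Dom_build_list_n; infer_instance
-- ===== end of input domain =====

-- B replaces A's single pass with an inline per-kind counter dict by a two-pass
-- group-then-scatter (group original indices per kind, then scatter ranks back); alternative decomposition, not faster.


-- ===== PORT A =====
-- for _event: _kind, _ = _event; list_n.append(counters[_kind]) (defaultdict → getD 0);
-- counters[_kind] += 1 → insert _kind (old + 1)
def build_list_n (list_event : List (String × Int)) : List Int :=
  (list_event.foldl
    (fun s e =>
      (s.1 ++ [s.2.getD e.1 0], s.2.insert e.1 (s.2.getD e.1 0 + 1)))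
    (([] : List Int), (PySem.Dict.empty : PySem.Dict String Int))).1

-- ===== PORT B =====
-- pass 1: for i, _event in enumerate(list_event): _kind, _ = _event; positions[_kind].append(i)
--         (defaultdict(list) → Dict.modify _kind [] (· ++ [i]))
-- list_n = [0]*len(list_event)
-- pass 2: for list_i in positions.values(): for n, i in enumerate(list_i): list_n[i] = n
def build_list_n_alt (list_event : List (String × Int)) : List Int :=
  let positions :=
    (PySem.List.enumerate list_event 0).foldl
      (fun d p => d.modify p.2.1 [] (fun l => l ++ [p.1]))
      (PySem.Dict.empty : PySem.Dict String (List Int))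
  let init := List.replicate list_event.length (0 : Int)
  positions.values.foldl
    (fun ln list_i =>
      (PySem.List.enumerate list_i 0).foldl
        (fun ln2 q => PySem.List.pySetD ln2 q.2 q.1) ln)
    init

-- ===== PRECONDITION & SPEC =====
def Spec_build_list_n (list_event : List (String × Int)) (out : List Int) : Prop := out = build_list_n_alt list_event
instance (list_event : List (String × Int)) (out : List Int) : Decidable (Spec_build_list_n list_event out) := by unfold Spec_build_list_n; infer_instance

-- ===== CLAIM (what is proved, stated in full; the proofs are below) =====
def Claim_equal_build_list_n : Prop := ∀ (list_event : List (String × Int)), Dom_build_list_n list_event → Spec_build_list_n list_event (build_list_n list_event)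

-- ===== LEMMAS AND PROOFS =====

-- ---- A side: the loop as structural recursion, then pointwise characterisation ----

-- A's loop, with the counter dict as parameter
def goA (d : PySem.Dict String Int) : List (String × Int) → List Int
  | [] => []
  | e :: t => d.getD e.1 0 :: goA (d.insert e.1 (d.getD e.1 0 + 1)) t

-- midpoint: the n of each event = count of its kind among kinds already seen
def goB (seen : List String) : List (String × Int) → List Int
  | [] => []
  | e :: t => (seen.count e.1 : Int) :: goB (seen ++ [e.1]) t

theorem foldA_eq_goA (le : List (String × Int)) (ln : List Int) (d : PySem.Dict String Int) :
    (le.foldl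
      (fun s e =>
        (s.1 ++ [s.2.getD e.1 0], s.2.insert e.1 (s.2.getD e.1 0 + 1)))
      (ln, d)).1 = ln ++ goA d le := by
  induction le generalizing ln d with
  | nil => simp [goA]
  | cons e t ih => simp [goA, ih]

theorem goA_eq_goB (le : List (String × Int)) (d : PySem.Dict String Int) (seen : List String)
    (h : ∀ k, d.getD k 0 = (seen.count k : Int)) : goA d le = goB seen le := by
  induction le generalizing d seen with
  | nil => simp [goA, goB]
  | cons e t ih =>
    simp only [goA, goB, h e.1]
    refine congrArg _ (ih _ (seen ++ [e.1]) ?_)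
    intro k
    rw [PySem.Dict.getD_insert]
    by_cases hk : k = e.1
    · simp [hk]
    · simp [hk, h k, List.count_append, Ne.symm hk]

theorem goB_getElem? (le : List (String × Int)) (pre : List String) (j : Nat) :
    (goB pre le)[j]? =
      le[j]?.map (fun e => (((pre ++ (le.map (·.1)).take j).count e.1 : Nat) : Int)) := by
  induction le generalizing pre j with
  | nil => simp [goB]
  | cons e t ih =>
    cases j with
    | zero => simp [goB]
    | succ j =>
      simp only [goB, List.getElem?_cons_succ, ih, List.map_cons, List.take_succ_cons]
      congr 1
      funext x
      simp [List.append_assoc]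

-- ---- B side ----

-- the per-kind index list positions[k] (indices ≥ s come from 'enumerate(list_event, s)')
def grpS (s : Int) (le : List (String × Int)) (k : String) : List Int :=
  ((PySem.List.enumerate le s).filter (fun p => p.2.1 == k)).map (·.1)

theorem grpS_cons (s : Int) (e : String × Int) (t : List (String × Int)) (k : String) :
    grpS s (e :: t) k = if e.1 == k then s :: grpS (s+1) t k else grpS (s+1) t k := by
  by_cases h : e.1 = k <;> simp [grpS, PySem.List.enumerate_cons, h]

theorem grpS_ge (s : Int) (le : List (String × Int)) (k : String) :
    ∀ x ∈ grpS s le k, s ≤ x := by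
  intro x hx
  simp only [grpS, List.mem_map, List.mem_filter] at hx
  obtain ⟨p, ⟨hp, _⟩, rfl⟩ := hx
  rw [PySem.List.mem_enumerate_iff] at hp
  obtain ⟨m, _, rfl⟩ := hp
  omega

-- enumerate-filter on a list none of whose items equals v
theorem enum_filter_none {xs : List Int} {v : Int} (c : Int) (h : ∀ x ∈ xs, x ≠ v) :
    (PySem.List.enumerate xs c).filter (fun q => q.2 == v) = [] := by
  induction xs generalizing c with
  | nil => simp [PySem.List.enumerate_nil]
  | cons x t ih =>
    have hx : x ≠ v := h x (by simp)
    simp [PySem.List.enumerate_cons, hx, ih _ (fun y hy => h y (by simp [hy]))]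

-- the unique write targeting index s + j inside kind k's enumerated group
theorem grp_enum_filter (le : List (String × Int)) (k : String) (s c : Int) (j : Nat)
    (hj : j < le.length) :
    (PySem.List.enumerate (grpS s le k) c).filter (fun q => q.2 == s + (j : Int)) =
      if le[j].1 == k then
        [(c + (((le.take j).map (·.1)).count k : Int), s + (j : Int))]
      else [] := by
  induction le generalizing s c j with
  | nil => simp at hj
  | cons e t ih =>
    rw [grpS_cons]
    cases j with
    | zero =>
      simp only [List.getElem_cons_zero, List.take_zero, List.map_nil, List.count_nil,
        Nat.cast_zero, add_zero]
      by_cases he : e.1 = k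
      · rw [if_pos (by simpa using he), if_pos (by simpa using he)]
        rw [PySem.List.enumerate_cons, List.filter_cons, if_pos (by simp)]
        rw [enum_filter_none (c+1) (fun x hx => by have := grpS_ge (s+1) t k x hx; omega)]
      · rw [if_neg (by simpa using he), if_neg (by simpa using he)]
        exact enum_filter_none c (fun x hx => by have := grpS_ge (s+1) t k x hx; omega)
    | succ j =>
      have hjt : j < t.length := by simpa using hj
      have hcast : (s+1) + (j : Int) = s + ((j+1 : Nat) : Int) := by push_cast; ring
      simp only [List.getElem_cons_succ, List.take_succ_cons, List.map_cons, List.count_cons]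
      by_cases he : e.1 = k
      · rw [if_pos (by simpa using he)]
        rw [PySem.List.enumerate_cons, List.filter_cons, if_neg (by simp; omega)]
        have h := ih (s+1) (c+1) j hjt
        rw [hcast] at h
        rw [h]
        by_cases ht : t[j].1 = k
        · rw [if_pos (by simpa using ht), if_pos (by simpa using ht)]
          simp only [he, beq_self_eq_true, if_true]
          refine congrArg (fun x => [(x, s + ((j+1 : Nat) : Int))]) ?_
          push_cast
          ring
        · rw [if_neg (by simpa using ht), if_neg (by simpa using ht)]
      · rw [if_neg (by simpa using he)]
        have h := ih (s+1) c j hjt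
        rw [hcast] at h
        rw [h]
        by_cases ht : t[j].1 = k
        · have h1 : (t[j].1 == k) = true := by simpa using ht
          simp only [h1, if_true]
          simp [he]
        · rw [if_neg (by simpa using ht), if_neg (by simpa using ht)]

-- fold of per-list folds = fold over the flattened write list
theorem foldl_foldl_flatMap {α β : Type} (L : List (List Int)) (g : List Int → List β)
    (f : α → β → α) (init : α) :
    L.foldl (fun a xs => (g xs).foldl f a) init = (L.flatMap g).foldl f init := by
  induction L generalizing init with
  | nil => simp
  | cons x t ih => simp [List.foldl_append, ih]

theorem filter_flatMap {α β : Type} (L : List α) (g : α → List β) (p : β → Bool) :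
    (L.flatMap g).filter p = L.flatMap (fun x => (g x).filter p) := by
  induction L with
  | nil => simp
  | cons x t ih => simp [List.filter_append, ih]

-- flatMap over a Nodup list where only one element yields a nonempty list
theorem flatMap_single {α β : Type} (L : List α) (f : α → List β) (k₀ : α)
    (hmem : k₀ ∈ L) (hnd : L.Nodup) (h : ∀ k ∈ L, k ≠ k₀ → f k = []) :
    L.flatMap f = f k₀ := by
  induction L with
  | nil => simp at hmem
  | cons x t ih =>
    rcases List.mem_cons.1 hmem with rfl | hmem'
    · have : ∀ k ∈ t, f k = [] := fun k hk =>
        h k (by simp [hk]) (fun hek => (List.nodup_cons.1 hnd).1 (hek ▸ hk))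
      simp [List.flatMap_cons, List.flatMap_eq_nil_iff.2 this]
    · have hx : f x = [] := h x (by simp) (fun hxe => (List.nodup_cons.1 hnd).1 (hxe ▸ hmem'))
      simp [List.flatMap_cons, hx,
        ih hmem' (List.nodup_cons.1 hnd).2 (fun k hk => h k (by simp [hk]))]

-- scatter: result at j = replay of the writes targeting j
theorem scatter_getElem? (ws : List (Int × Int)) (ln : List Int) (j : Nat)
    (hj : j < ln.length) (hw : ∀ q ∈ ws, 0 ≤ q.2) :
    (ws.foldl (fun a q => PySem.List.pySetD a q.2 q.1) ln)[j]? =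
      (ws.filter (fun q => q.2 == (j : Int))).foldl (fun _ q => some q.1) ln[j]? := by
  induction ws generalizing ln with
  | nil => simp
  | cons q t ih =>
    have hq : 0 ≤ q.2 := hw q (by simp)
    rw [List.foldl_cons, List.filter_cons, PySem.List.pySetD_of_nonneg ln q.1 hq]
    by_cases hqj : q.2 = (j : Int)
    · rw [ih (ln.set q.2.toNat q.1) (by simpa using hj) (fun p hp => hw p (by simp [hp]))]
      rw [if_pos (by simp [hqj])]
      rw [show q.2.toNat = j by omega]
      rw [List.foldl_cons]
      congr 1
      rw [List.getElem?_set_self (by simpa using hj)]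
    · have hne : q.2.toNat ≠ j := by omega
      have hset : (ln.set q.2.toNat q.1)[j]? = ln[j]? := List.getElem?_set_ne hne
      rw [ih (ln.set q.2.toNat q.1) (by simpa using hj) (fun p hp => hw p (by simp [hp]))]
      simp [hqj, hset]

theorem scatter_length (ws : List (Int × Int)) (ln : List Int) :
    (ws.foldl (fun a q => PySem.List.pySetD a q.2 q.1) ln).length = ln.length := by
  induction ws generalizing ln with
  | nil => rfl
  | cons q t ih => simp [ih, PySem.List.length_pySetD]

-- B's dict, rewritten: values = per-kind index lists over the distinct kinds
theorem alt_eq_scatter (le : List (String × Int)) :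
    build_list_n_alt le =
      ((PySem.Set.ofList (le.map (·.1))).flatMap
          (fun k => PySem.List.enumerate (grpS 0 le k) 0)).foldl
        (fun a q => PySem.List.pySetD a q.2 q.1)
        (List.replicate le.length (0 : Int)) := by
  simp only [build_list_n_alt]
  have hkeys :
      ((PySem.List.enumerate le 0).foldl
        (fun d p => d.modify p.2.1 [] (fun l => l ++ [p.1]))
        (PySem.Dict.empty : PySem.Dict String (List Int))).keys
      = PySem.Set.ofList (le.map (·.1)) := by
    rw [PySem.Dict.keys_foldl_modify_key (PySem.List.enumerate le 0)
          (fun p => p.2.1) [] (fun _ p l => l ++ [p.1]) PySem.Dict.empty]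
    have : (PySem.List.enumerate le 0).map (fun p => p.2.1) = le.map (·.1) := by
      rw [show (fun p : Int × String × Int => p.2.1) = (·.1) ∘ (·.2) from rfl,
        ← List.map_map, PySem.List.map_snd_enumerate]
    rw [this]
    rfl
  have hnd :
      ((PySem.List.enumerate le 0).foldl
        (fun d p => d.modify p.2.1 [] (fun l => l ++ [p.1]))
        (PySem.Dict.empty : PySem.Dict String (List Int))).keys.Nodup := by
    exact PySem.Dict.nodup_keys_foldl_modify_key (PySem.List.enumerate le 0)
      (fun p => p.2.1) [] (fun _ p l => l ++ [p.1]) PySem.Dict.empty (by simp)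
  have hgetD : ∀ k,
      ((PySem.List.enumerate le 0).foldl
        (fun d p => d.modify p.2.1 [] (fun l => l ++ [p.1]))
        (PySem.Dict.empty : PySem.Dict String (List Int))).getD k []
      = grpS 0 le k := by
    intro k
    have hmap : ((PySem.List.enumerate le 0).foldl
          (fun d p => d.modify p.2.1 [] (fun l => l ++ [p.1]))
          (PySem.Dict.empty : PySem.Dict String (List Int)))
        = (((PySem.List.enumerate le 0).map (fun p => (p.2.1, p.1))).foldl
          (fun d q => d.modify q.1 [] (fun l => l ++ [q.2]))
          (PySem.Dict.empty : PySem.Dict String (List Int))) := by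
      rw [List.foldl_map]
    rw [hmap, PySem.Dict.getD_foldl_modify_append]
    rw [List.filter_map, List.map_map]
    simp only [PySem.Dict.getD_empty, List.nil_append]
    rfl
  rw [PySem.Dict.values_eq_map_keys _ hnd [], hkeys]
  rw [foldl_foldl_flatMap _ (fun xs => PySem.List.enumerate xs 0)]
  rw [List.flatMap_map]
  have hfun : (fun a => PySem.List.enumerate
      (((PySem.List.enumerate le 0).foldl
        (fun d p => d.modify p.2.1 [] (fun l => l ++ [p.1]))
        (PySem.Dict.empty : PySem.Dict String (List Int))).getD a []) 0)
      = fun k => PySem.List.enumerate (grpS 0 le k) 0 := by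
    funext k
    rw [hgetD k]
  rw [hfun]

-- every scatter write has a nonnegative target index
theorem writes_nonneg (le : List (String × Int)) :
    ∀ q ∈ (PySem.Set.ofList (le.map (·.1))).flatMap
        (fun k => PySem.List.enumerate (grpS 0 le k) 0), 0 ≤ q.2 := by
  intro q hq
  rw [List.mem_flatMap] at hq
  obtain ⟨k, _, hq⟩ := hq
  rw [PySem.List.mem_enumerate_iff] at hq
  obtain ⟨m, hm, rfl⟩ := hq
  exact grpS_ge 0 le k _ (List.getElem_mem hm)

-- ===== VERDICT (by name: the statement is the Claim_ definition above) =====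
theorem build_list_n_spec : Claim_equal_build_list_n := by
  intro le _
  unfold Spec_build_list_n
  have hA : build_list_n le = goB [] le := by
    unfold build_list_n
    rw [foldA_eq_goA, List.nil_append,
      goA_eq_goB le PySem.Dict.empty [] (by intro k; simp [PySem.Dict.getD_empty])]
  rw [hA, alt_eq_scatter]
  apply List.ext_getElem?
  intro j
  by_cases hj : j < le.length
  · rw [scatter_getElem? _ _ j (by simpa using hj) (writes_nonneg le)]
    rw [filter_flatMap]
    have hmem : le[j].1 ∈ PySem.Set.ofList (le.map (·.1)) := by
      rw [PySem.Set.mem_ofList]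
      exact List.mem_map.2 ⟨le[j], List.getElem_mem hj, rfl⟩
    have hsingle :
        (PySem.Set.ofList (le.map (·.1))).flatMap
            (fun k => (PySem.List.enumerate (grpS 0 le k) 0).filter
              (fun q => q.2 == (j : Int)))
        = [((((le.take j).map (·.1)).count le[j].1 : Int), (j : Int))] := by
      rw [flatMap_single _ _ le[j].1 hmem (PySem.Set.nodup_ofList _)
        (fun k hk hne => by
          have := grp_enum_filter le k 0 0 j hj
          simp only [zero_add] at this
          rw [this, if_neg (by simpa using fun h => hne h.symm)])]
      have := grp_enum_filter le le[j].1 0 0 j hj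
      simp only [zero_add] at this
      rw [this, if_pos (by simp)]
    rw [hsingle]
    rw [goB_getElem?]
    simp only [List.foldl_cons, List.foldl_nil]
    rw [List.getElem?_eq_getElem hj]
    simp [List.map_take]
  · have h1 : (goB [] le)[j]? = none := by
      rw [goB_getElem?]
      simp [List.getElem?_eq_none (by omega : le.length ≤ j)]
    have h2 := scatter_length
      ((PySem.Set.ofList (le.map (·.1))).flatMap
        (fun k => PySem.List.enumerate (grpS 0 le k) 0))
      (List.replicate le.length (0 : Int))
    rw [h1, List.getElem?_eq_none]
    rw [h2]
    simpa using (by omega : le.length ≤ j)
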